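-- pv_equiv track=rewrite | github.com/monowilliam/UVa-Problems | set.py | solve
-- ===== SOURCE A (Python) =====
-- from operator import itemgetter
--
-- def solve(S,G):
--     temp1,temp2=[],[]
--     for i in range(len(S)):
--         if G[i] >= S[i]:
--             temp1.append([S[i],G[i]])
--         else:
--             temp2.append([S[i],G[i]])
--     ord1=sorted(temp1, key=itemgetter(0))
--     ord2=sorted(temp2, key=itemgetter(1),reverse=True)
--     ord1.extend(ord2)
--     x=ord1[0][0]
--     y=x+ord1[0][1]
--     for i in range(1,len(ord1)):
--         x=ord1[i][0]+x
--         if x>y: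
--             y = x + ord1[i][1]
--         else:
--             y = y + ord1[i][1]
--     return y
-- ===== SOURCE B (Python) =====
-- def solve(S, G):
--     # Closed-form characterization: the answer is max over positions k of
--     # (sum of starts up to k) + (sum of G from k on) in the processing order,
--     # computed from prefix/suffix sum tables instead of a running DP recurrence.
--     pairs = sorted(zip(S, G),
--                    key=lambda p: (0, p[0]) if p[1] >= p[0] else (1, -p[1]))
--     starts = []
--     x = 0
--     for s, _ in pairs:
--         x += s
--         starts.append(x)
--     tails = []
--     t = 0
--     for _, g in reversed(pairs):
--         t += g
--         tails.append(t)
--     tails.reverse()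
--     return max(p + q for p, q in zip(starts, tails))
-- ===== Notes on version B (the rewrite author's own statement) =====
-- stated objective: alternative
-- what changed: B replaces A's partition-into-two-lists + two sorts + running DP recurrence (x cumulated, y = max(x,y)+g per step) by one composite-key sort followed by a closed-form evaluation: a prefix-sum table of starts, a suffix-sum table of G, and the maximum of their pointwise sums, proved equal to A's recurrence result.
import Mathlib
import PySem

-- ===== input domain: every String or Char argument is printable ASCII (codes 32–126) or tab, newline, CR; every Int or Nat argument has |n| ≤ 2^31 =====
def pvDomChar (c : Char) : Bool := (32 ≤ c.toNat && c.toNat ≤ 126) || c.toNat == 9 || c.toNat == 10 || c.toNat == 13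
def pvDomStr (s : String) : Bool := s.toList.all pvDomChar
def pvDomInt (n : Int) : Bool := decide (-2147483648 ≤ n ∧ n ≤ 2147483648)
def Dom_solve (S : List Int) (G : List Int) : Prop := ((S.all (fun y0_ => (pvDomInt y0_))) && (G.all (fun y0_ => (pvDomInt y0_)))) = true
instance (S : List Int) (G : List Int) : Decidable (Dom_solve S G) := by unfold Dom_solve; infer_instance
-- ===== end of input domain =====

-- B replaces A's partition loop + two separate sorts + running max-recurrence by one
-- composite-key sort and a closed-form evaluation — prefix sums of starts, suffix sums
-- of G, maximum of their pointwise sums (objective: alternative; no speed claim).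

-- ===== PORT A =====
def solve (S : List Int) (G : List Int) : Int :=
  let tt := (PySem.List.pyRange 0 (PySem.List.len S) 1).foldl
      (fun (acc : List (Int × Int) × List (Int × Int)) i =>
        if PySem.List.pyGetD G i 0 ≥ PySem.List.pyGetD S i 0 then
          (acc.1 ++ [(PySem.List.pyGetD S i 0, PySem.List.pyGetD G i 0)], acc.2)
        else
          (acc.1, acc.2 ++ [(PySem.List.pyGetD S i 0, PySem.List.pyGetD G i 0)]))
      ([], [])
  let ord := PySem.List.sorted tt.1 (fun p => p.1) false
              ++ PySem.List.sorted tt.2 (fun p => p.2) true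
  let x0 := (PySem.List.pyGetD ord 0 ((0 : Int), (0 : Int))).1
  let y0 := x0 + (PySem.List.pyGetD ord 0 ((0 : Int), (0 : Int))).2
  let r := (PySem.List.pyRange 1 (PySem.List.len ord) 1).foldl
      (fun (acc : Int × Int) i =>
        let x := (PySem.List.pyGetD ord i ((0 : Int), (0 : Int))).1 + acc.1
        if x > acc.2 then (x, x + (PySem.List.pyGetD ord i ((0 : Int), (0 : Int))).2)
        else (x, acc.2 + (PySem.List.pyGetD ord i ((0 : Int), (0 : Int))).2))
      (x0, y0)
  r.2

-- ===== PORT B =====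
def solve_alt (S : List Int) (G : List Int) : Int :=
  let pairs := PySem.List.sorted2 (S.zip G)
      (fun p => if p.2 ≥ p.1 then (0 : Int) else 1)
      (fun p => if p.2 ≥ p.1 then p.1 else -p.2) false
  let starts := (pairs.foldl (fun (acc : Int × List Int) p =>
      (acc.1 + p.1, acc.2 ++ [acc.1 + p.1])) ((0 : Int), ([] : List Int))).2
  let tails := ((pairs.reverse.foldl (fun (acc : Int × List Int) p =>
      (acc.1 + p.2, acc.2 ++ [acc.1 + p.2])) ((0 : Int), ([] : List Int))).2).reverse
  (PySem.List.max? ((starts.zip tails).map (fun q => q.1 + q.2)) (fun y => y)).getD 0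

-- ===== PRECONDITION & SPEC =====
-- Pre_ excludes exactly the inputs on which A raises: empty S (IndexError on ord1[0])
-- and len(G) < len(S) (IndexError on G[i]).
def Pre_solve (S : List Int) (G : List Int) : Prop := S ≠ [] ∧ S.length ≤ G.length
instance (S : List Int) (G : List Int) : Decidable (Pre_solve S G) := by unfold Pre_solve; infer_instance
def pvWitness_solve : List Int × List Int := ([1, 5], [2, 3])

def Spec_solve (S : List Int) (G : List Int) (out : Int) : Prop := out = solve_alt S G
instance (S : List Int) (G : List Int) (out : Int) : Decidable (Spec_solve S G out) := by unfold Spec_solve; infer_instance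

-- ===== CLAIM (what is proved, stated in full; the proofs are below) =====
def Claim_equal_solve : Prop := ∀ (S : List Int) (G : List Int), Dom_solve S G → Pre_solve S G → Spec_solve S G (solve S G)

-- ===== LEMMAS AND PROOFS =====

-- the comparator of B's composite-key sort
def pvBef2 : (Int × Int) → (Int × Int) → Bool := fun a b =>
  decide ((if a.2 ≥ a.1 then (0 : Int) else 1) < (if b.2 ≥ b.1 then (0 : Int) else 1)) ||
  (!decide ((if b.2 ≥ b.1 then (0 : Int) else 1) < (if a.2 ≥ a.1 then (0 : Int) else 1)) &&
   decide ((if a.2 ≥ a.1 then a.1 else -a.2) < (if b.2 ≥ b.1 then b.1 else -b.2)))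

theorem pv_insertBy_congr {α : Type} (bef bef' : α → α → Bool) (x : α) (A : List α)
    (h : ∀ a ∈ A, bef x a = bef' x a) :
    PySem.List.insertBy bef x A = PySem.List.insertBy bef' x A := by
  induction A with
  | nil => rfl
  | cons a t ih =>
      have ha := h a (by simp)
      simp only [PySem.List.insertBy, ha]
      by_cases hb : bef' x a = true
      · simp [hb]
      · simp only [Bool.not_eq_true] at hb
        simp [hb, ih (fun a ha' => h a (by simp [ha']))]

theorem pv_insertBy_append_head {α : Type} (bef : α → α → Bool) (x : α) (A B : List α)
    (h : ∀ b ∈ B, bef x b = true) :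
    PySem.List.insertBy bef x (A ++ B) = PySem.List.insertBy bef x A ++ B := by
  induction A with
  | nil =>
      cases B with
      | nil => rfl
      | cons b t => simp [PySem.List.insertBy, h b (by simp)]
  | cons a t ih =>
      by_cases hb : bef x a = true
      · simp [PySem.List.insertBy, hb]
      · simp only [Bool.not_eq_true] at hb
        simp [PySem.List.insertBy, hb, ih]

theorem pv_insertBy_append_skip {α : Type} (bef : α → α → Bool) (x : α) (A B : List α)
    (h : ∀ a ∈ A, bef x a = false) :
    PySem.List.insertBy bef x (A ++ B) = A ++ PySem.List.insertBy bef x B := by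
  induction A with
  | nil => rfl
  | cons a t ih =>
      simp [PySem.List.insertBy, h a (by simp),
        ih (fun a ha => h a (by simp [ha]))]

theorem pv_split_sort (l : List (Int × Int)) :
    PySem.List.sorted2 l
      (fun p => if p.2 ≥ p.1 then (0 : Int) else 1)
      (fun p => if p.2 ≥ p.1 then p.1 else -p.2) false
    = PySem.List.sorted (l.filter (fun p => decide (p.2 ≥ p.1))) (fun p => p.1) false
      ++ PySem.List.sorted (l.filter (fun p => !decide (p.2 ≥ p.1))) (fun p => p.2) true := by
  induction l using List.reverseRecOn with
  | nil => rfl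
  | append_singleton t x ih =>
      have hstep2 : PySem.List.sorted2 (t ++ [x])
          (fun p => if p.2 ≥ p.1 then (0 : Int) else 1)
          (fun p => if p.2 ≥ p.1 then p.1 else -p.2) false
          = PySem.List.insertBy pvBef2 x (PySem.List.sorted2 t
              (fun p => if p.2 ≥ p.1 then (0 : Int) else 1)
              (fun p => if p.2 ≥ p.1 then p.1 else -p.2) false) := by
        show List.foldl (fun acc y => PySem.List.insertBy pvBef2 y acc) [] (t ++ [x])
            = PySem.List.insertBy pvBef2 x
                (List.foldl (fun acc y => PySem.List.insertBy pvBef2 y acc) [] t)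
        rw [List.foldl_append]
        rfl
      have hstepA : ∀ (u : List (Int × Int)),
          PySem.List.sorted (u ++ [x]) (fun p => p.1) false
          = PySem.List.insertBy (fun a b => decide (a.1 < b.1)) x
              (PySem.List.sorted u (fun p => p.1) false) := by
        intro u
        rw [PySem.List.sorted_eq_foldl_insertBy, PySem.List.sorted_eq_foldl_insertBy,
          List.foldl_append]
        rfl
      have hstepB : ∀ (u : List (Int × Int)),
          PySem.List.sorted (u ++ [x]) (fun p => p.2) true
          = PySem.List.insertBy (fun a b => decide (b.2 < a.2)) x
              (PySem.List.sorted u (fun p => p.2) true) := by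
        intro u
        rw [PySem.List.sorted_rev_eq_foldl_insertBy, PySem.List.sorted_rev_eq_foldl_insertBy,
          List.foldl_append]
        rfl
      have hA : ∀ a ∈ PySem.List.sorted (t.filter (fun p => decide (p.2 ≥ p.1)))
          (fun p => p.1) false, a.2 ≥ a.1 := by
        intro a ha
        rw [PySem.List.mem_sorted] at ha
        simpa using (List.mem_filter.mp ha).2
      have hB : ∀ b ∈ PySem.List.sorted (t.filter (fun p => !decide (p.2 ≥ p.1)))
          (fun p => p.2) true, ¬ (b.2 ≥ b.1) := by
        intro b hb
        rw [PySem.List.mem_sorted] at hb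
        simpa using (List.mem_filter.mp hb).2
      rw [hstep2, ih]
      by_cases hx : x.2 ≥ x.1
      · rw [List.filter_append, List.filter_append]
        simp only [List.filter_cons, List.filter_nil, hx, decide_true, Bool.not_true,
          if_true, if_false, List.append_nil, Bool.false_eq_true]
        rw [hstepA]
        rw [pv_insertBy_append_head _ _ _ _ (by
          intro b hb
          have := hB b hb
          simp [pvBef2, hx, this])]
        exact congrArg (· ++ _) (pv_insertBy_congr _ _ _ _ (by
          intro a ha
          have := hA a ha
          simp [pvBef2, hx, this]))
      · rw [List.filter_append, List.filter_append]
        simp only [List.filter_cons, List.filter_nil, hx, decide_false, Bool.not_false,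
          if_true, if_false, List.append_nil, Bool.false_eq_true]
        rw [hstepB]
        rw [pv_insertBy_append_skip _ _ _ _ (by
          intro a ha
          have := hA a ha
          simp [pvBef2, hx, this])]
        exact congrArg (_ ++ ·) (pv_insertBy_congr _ _ _ _ (by
          intro b hb
          have := hB b hb
          simp [pvBef2, hx, this]))

theorem pv_partition (l : List (Int × Int)) (a b : List (Int × Int)) :
    l.foldl
      (fun (acc : List (Int × Int) × List (Int × Int)) p =>
        if p.2 ≥ p.1 then (acc.1 ++ [p], acc.2) else (acc.1, acc.2 ++ [p])) (a, b)
    = (a ++ l.filter (fun p => decide (p.2 ≥ p.1)),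
       b ++ l.filter (fun p => !decide (p.2 ≥ p.1))) := by
  induction l generalizing a b with
  | nil => simp
  | cons p t ih =>
      by_cases hp : p.2 ≥ p.1 <;> simp [List.foldl_cons, hp, ih]

-- sum of the starts / of the G-values of a pair list
def pvSs : List (Int × Int) → Int
  | [] => 0
  | p :: t => p.1 + pvSs t

def pvSg : List (Int × Int) → Int
  | [] => 0
  | p :: t => p.2 + pvSg t

-- prefix sums of starts (offset x), suffix sums of G (offset a)
def pvPfx : List (Int × Int) → Int → List Int
  | [], _ => []
  | p :: t, x => (x + p.1) :: pvPfx t (x + p.1)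

def pvSfxa : List (Int × Int) → Int → List Int
  | [], _ => []
  | p :: t, a => (p.2 + pvSg t + a) :: pvSfxa t a

def pvSfx : List (Int × Int) → List Int
  | [] => []
  | p :: t => (p.2 + pvSg t) :: pvSfx t

-- the candidate values: prefix-sum of starts + suffix-sum of G, position-wise
def pvCands : List (Int × Int) → Int → List Int
  | [], _ => []
  | p :: t, x => ((x + p.1) + (p.2 + pvSg t)) :: pvCands t (x + p.1)

theorem pv_pfx (l : List (Int × Int)) (x : Int) (acc : List Int) :
    l.foldl (fun (a : Int × List Int) p => (a.1 + p.1, a.2 ++ [a.1 + p.1])) (x, acc)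
    = (x + pvSs l, acc ++ pvPfx l x) := by
  induction l generalizing x acc with
  | nil => simp [pvSs, pvPfx]
  | cons p t ih =>
      simp only [List.foldl_cons]
      rw [ih]
      simp only [pvSs, pvPfx, Prod.mk.injEq]
      exact ⟨by ring, by simp⟩

theorem pv_sfx (l : List (Int × Int)) (a : Int) (acc : List Int) :
    l.reverse.foldl (fun (q : Int × List Int) p => (q.1 + p.2, q.2 ++ [q.1 + p.2])) (a, acc)
    = (a + pvSg l, acc ++ (pvSfxa l a).reverse) := by
  induction l generalizing acc with
  | nil => simp [pvSg, pvSfxa]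
  | cons p t ih =>
      rw [List.reverse_cons, List.foldl_append, ih]
      simp only [List.foldl_cons, List.foldl_nil, pvSg, pvSfxa, List.reverse_cons,
        Prod.mk.injEq]
      refine ⟨by ring, ?_⟩
      rw [show a + pvSg t + p.2 = p.2 + pvSg t + a from by ring]
      simp [List.append_assoc]

theorem pv_sfxa_zero (l : List (Int × Int)) : pvSfxa l 0 = pvSfx l := by
  induction l with
  | nil => rfl
  | cons p t ih => simp [pvSfxa, pvSfx, ih]

theorem pv_cands_eq (l : List (Int × Int)) (x : Int) :
    ((pvPfx l x).zip (pvSfx l)).map (fun q => q.1 + q.2) = pvCands l x := by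
  induction l generalizing x with
  | nil => rfl
  | cons p t ih => simp [pvPfx, pvSfx, pvCands, ih]

-- A's recurrence y = max(x, y) + g, run over t from (x, y), computes the running
-- maximum of the candidates shifted by the remaining G-sum.
theorem pv_Achar (t : List (Int × Int)) (x y : Int) :
    (t.foldl (fun (acc : Int × Int) p =>
        let x := p.1 + acc.1
        if x > acc.2 then (x, x + p.2) else (x, acc.2 + p.2)) (x, y)).2
    = (pvCands t x).foldl max (y + pvSg t) := by
  induction t generalizing x y with
  | nil => simp [pvCands, pvSg]
  | cons p t ih =>
      simp only [List.foldl_cons]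
      by_cases h : p.1 + x > y
      · rw [if_pos h, ih, Int.add_comm p.1 x]
        simp only [pvCands, pvSg, List.foldl_cons]
        congr 1
        omega
      · rw [if_neg h, ih]
        rw [show p.1 + x = x + p.1 from by ring]
        simp only [pvCands, pvSg, List.foldl_cons]
        congr 1
        omega

theorem pv_main (S G : List Int) (hne : S ≠ []) (hlen : S.length ≤ G.length) :
    solve S G = solve_alt S G := by
  simp only [solve, solve_alt]
  have hzlen : (S.zip G).length = S.length := by
    simp [List.length_zip]; omega
  -- step 1: the partition loop over indices is a fold over S.zip G
  have hc : ∀ (acc : List (Int × Int) × List (Int × Int)) (i : Int),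
      i ∈ PySem.List.pyRange 0 (PySem.List.len S) 1 →
      (if PySem.List.pyGetD G i 0 ≥ PySem.List.pyGetD S i 0 then
          (acc.1 ++ [(PySem.List.pyGetD S i 0, PySem.List.pyGetD G i 0)], acc.2)
        else
          (acc.1, acc.2 ++ [(PySem.List.pyGetD S i 0, PySem.List.pyGetD G i 0)]))
      = (fun (acc : List (Int × Int) × List (Int × Int)) p =>
          if p.2 ≥ p.1 then (acc.1 ++ [p], acc.2) else (acc.1, acc.2 ++ [p])) acc
          (PySem.List.pyGetD (S.zip G) i ((0 : Int), (0 : Int))) := by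
    intro acc i hi
    rw [PySem.List.mem_pyRange_one] at hi
    simp only [PySem.List.len_eq] at hi
    have hiS : i < (S.length : Int) := hi.2
    have hiG : i < (G.length : Int) := by omega
    have hiZ : i < ((S.zip G).length : Int) := by rw [hzlen]; omega
    rw [PySem.List.pyGetD_eq_getElem S 0 hi.1 hiS,
      PySem.List.pyGetD_eq_getElem G 0 hi.1 hiG,
      PySem.List.pyGetD_eq_getElem (S.zip G) ((0 : Int), (0 : Int)) hi.1 hiZ]
    simp [List.getElem_zip]
  rw [PySem.List.foldl_congr_mem _ _ _ _ hc]
  have hlen' : (PySem.List.len S) = (PySem.List.len (S.zip G)) := by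
    simp [PySem.List.len_eq, hzlen]
  rw [hlen', PySem.List.foldl_pyRange_zero_pyGetD (S.zip G) ((0 : Int), (0 : Int))
      (fun (acc : List (Int × Int) × List (Int × Int)) p =>
        if p.2 ≥ p.1 then (acc.1 ++ [p], acc.2) else (acc.1, acc.2 ++ [p])) ([], []),
    pv_partition, pv_split_sort]
  simp only [List.nil_append]
  -- name the concatenated sorted list; it is nonempty
  set L := PySem.List.sorted ((S.zip G).filter (fun p => decide (p.2 ≥ p.1))) (fun p => p.1) false
      ++ PySem.List.sorted ((S.zip G).filter (fun p => !decide (p.2 ≥ p.1))) (fun p => p.2) true with hL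
  have hLlen : L.length = (S.zip G).length := by
    rw [hL, List.length_append, PySem.List.length_sorted, PySem.List.length_sorted]
    exact (List.length_eq_length_filter_add _).symm
  have hLne : L ≠ [] := by
    intro h
    rw [h] at hLlen
    simp [hzlen] at hLlen
    exact hne (List.eq_nil_of_length_eq_zero hLlen.symm)
  -- step 2: A's second loop over indices is a fold over the tail of L
  rw [PySem.List.foldl_pyRange_pyGetD (a := 1) L ((0 : Int), (0 : Int))
    (fun (acc : Int × Int) p =>
        let x := p.1 + acc.1
        if x > acc.2 then (x, x + p.2) else (x, acc.2 + p.2)) _ (by omega)]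
  obtain ⟨hd, tl, hcons⟩ := List.exists_cons_of_ne_nil hLne
  rw [hcons]
  simp only [PySem.List.pyGetD_zero_cons, List.drop_succ_cons, List.drop_zero,
    Int.toNat_one]
  -- A's side: the recurrence equals the running max of the candidates
  rw [pv_Achar]
  -- B's side: the two staged passes build exactly the prefix/suffix tables
  rw [pv_pfx, pv_sfx, List.nil_append, List.nil_append, List.reverse_reverse,
    pv_sfxa_zero, pv_cands_eq]
  simp only [pvCands, PySem.List.max?_id_cons, Option.getD_some, zero_add]
  congr 1
  omega

-- ===== VERDICT (by name: the statement is the Claim_ definition above) =====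
theorem solve_spec : Claim_equal_solve := by
  intro S G _ hpre
  unfold Spec_solve
  exact pv_main S G hpre.1 hpre.2
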